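-- pv_equiv track=rewrite | github.com/foysall34/Night-Club | all_club/services/club_type_detector.py | detect_from_categories
-- ===== SOURCE A (Python) =====
-- def detect_from_categories(categories):
--     if not categories:
--         return None
--
--     text = categories.lower()
--
--     if any(x in text for x in ["edm", "dj", "techno", "house"]):
--         return "EDM"
--     if any(x in text for x in ["lounge", "chill", "cocktail"]):
--         return "Lounge"
--     if any(x in text for x in ["bar", "pub", "tavern"]):
--         return "Bar"
--     if any(x in text for x in ["nightclub", "dance club", "club"]):
--         return "Nightclub"
--     if any(x in text for x in ["live", "band", "concert"]):
--         return "Live Music"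
--     if "rooftop" in text:
--         return "Rooftop"
--
--     return None
-- ===== SOURCE B (Python) =====
-- _KEYWORDS = [
--     ("edm", 0), ("dj", 0), ("techno", 0), ("house", 0),
--     ("lounge", 1), ("chill", 1), ("cocktail", 1),
--     ("bar", 2), ("pub", 2), ("tavern", 2),
--     ("nightclub", 3), ("dance club", 3), ("club", 3),
--     ("live", 4), ("band", 4), ("concert", 4),
--     ("rooftop", 5),
-- ]
-- _LABELS = ["EDM", "Lounge", "Bar", "Nightclub", "Live Music", "Rooftop"]
--
--
-- def detect_from_categories(categories):
--     if not categories: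
--         return None
--     text = categories.lower()
--     hits = [p for k, p in _KEYWORDS if k in text]
--     if not hits:
--         return None
--     return _LABELS[min(hits)]
-- ===== Notes on version B (the rewrite author's own statement) =====
-- stated objective: alternative
-- what changed: Instead of an ordered if-chain with early return on the first matching keyword group, B collects the priorities of ALL matching keywords from a flat keyword-to-priority map and aggregates them with min, then indexes a label array; correctness relies on priorities encoding the chain order.
import Mathlib
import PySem

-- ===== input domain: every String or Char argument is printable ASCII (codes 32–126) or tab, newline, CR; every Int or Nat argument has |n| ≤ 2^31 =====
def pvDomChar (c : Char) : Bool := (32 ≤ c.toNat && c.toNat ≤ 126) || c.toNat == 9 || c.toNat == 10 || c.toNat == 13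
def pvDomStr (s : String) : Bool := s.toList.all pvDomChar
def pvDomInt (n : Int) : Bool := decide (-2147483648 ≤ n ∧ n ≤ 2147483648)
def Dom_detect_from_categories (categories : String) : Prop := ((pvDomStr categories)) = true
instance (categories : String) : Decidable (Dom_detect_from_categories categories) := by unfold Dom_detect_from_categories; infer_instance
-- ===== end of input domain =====

-- B replaces A's first-match if-chain by a flat keyword→priority map: it collects the
-- priorities of ALL matching keywords and aggregates with min (priorities encode chain order).

-- ===== PORT A =====
def detect_from_categories (categories : String) : Option String :=
  if categories == "" then none
  else
    let text := PySem.Str.lower categories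
    if ["edm", "dj", "techno", "house"].any (fun x => PySem.Str.isIn x text) then some "EDM"
    else if ["lounge", "chill", "cocktail"].any (fun x => PySem.Str.isIn x text) then some "Lounge"
    else if ["bar", "pub", "tavern"].any (fun x => PySem.Str.isIn x text) then some "Bar"
    else if ["nightclub", "dance club", "club"].any (fun x => PySem.Str.isIn x text) then some "Nightclub"
    else if ["live", "band", "concert"].any (fun x => PySem.Str.isIn x text) then some "Live Music"
    else if PySem.Str.isIn "rooftop" text then some "Rooftop"
    else none

-- ===== PORT B =====
def pvKeywords : List (String × Int) :=
  [ ("edm", 0), ("dj", 0), ("techno", 0), ("house", 0),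
    ("lounge", 1), ("chill", 1), ("cocktail", 1),
    ("bar", 2), ("pub", 2), ("tavern", 2),
    ("nightclub", 3), ("dance club", 3), ("club", 3),
    ("live", 4), ("band", 4), ("concert", 4),
    ("rooftop", 5) ]

def pvLabels : List String := ["EDM", "Lounge", "Bar", "Nightclub", "Live Music", "Rooftop"]

-- Python's `if not hits: return None; return _LABELS[min(hits)]` is ported through
-- PySem.List.min?, which is none exactly when hits is empty (the guarded case).
def detect_from_categories_alt (categories : String) : Option String :=
  if categories == "" then none
  else
    let text := PySem.Str.lower categories
    let hits := (pvKeywords.filter (fun kp => PySem.Str.isIn kp.1 text)).map (fun kp => kp.2)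
    match PySem.List.min? hits (fun p => p) with
    | none => none
    | some p => PySem.List.pyGet? pvLabels p

-- ===== PRECONDITION & SPEC =====
def Spec_detect_from_categories (categories : String) (out : Option String) : Prop := out = detect_from_categories_alt categories
instance (categories : String) (out : Option String) : Decidable (Spec_detect_from_categories categories out) := by unfold Spec_detect_from_categories; infer_instance

-- ===== CLAIM (what is proved, stated in full; the proofs are below) =====
def Claim_equal_detect_from_categories : Prop := ∀ (categories : String), Dom_detect_from_categories categories → Spec_detect_from_categories categories (detect_from_categories categories)

-- ===== LEMMAS AND PROOFS =====

-- min? of a list whose head bounds every tail element is the head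
theorem pvMinHead (p : Int) (l : List Int) (h : ∀ x ∈ l, p ≤ x) :
    PySem.List.min? (p :: l) (fun y => y) = some p := by
  cases eq : PySem.List.min? (p :: l) (fun y => y) with
  | none => simp [PySem.List.min?_eq_none_iff] at eq
  | some m =>
    have hm := PySem.List.min?_mem eq
    have hmin := PySem.List.min?_isMin eq p (by simp)
    rcases List.mem_cons.mp hm with h1 | h2
    · rw [h1]
    · have := h m h2
      have : m = p := by omega
      rw [this]

theorem pvMapFilterBound {f : String × Int → Bool} {l : List (String × Int)} {p : Int}
    (h : ∀ a ∈ l, p ≤ a.2) : ∀ x ∈ (l.filter f).map (fun a => a.2), p ≤ x := by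
  intro x hx
  simp only [List.mem_map, List.mem_filter] at hx
  obtain ⟨a, ⟨ha, _⟩, rfl⟩ := hx
  exact h a ha

theorem pvLeafMin (f : String × Int → Bool) (pre rest : List (String × Int)) (k : String) (p : Int)
    (hpre : pre.filter f = []) (hcur : f (k, p) = true) (hrest : ∀ a ∈ rest, p ≤ a.2) :
    PySem.List.min? (((pre ++ (k, p) :: rest).filter f).map (fun a => a.2)) (fun y => y) = some p := by
  rw [List.filter_append, hpre, List.nil_append, List.filter_cons_of_pos hcur, List.map_cons]
  exact pvMinHead p _ (pvMapFilterBound hrest)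

-- ===== VERDICT (by name: the statement is the Claim_ definition above) =====
theorem detect_from_categories_spec : Claim_equal_detect_from_categories := by
  intro categories _
  unfold Spec_detect_from_categories detect_from_categories detect_from_categories_alt
  by_cases hc : categories == ""
  · simp [hc]
  · simp only [hc, Bool.false_eq_true, if_false]
    set text := PySem.Str.lower categories with htext
    set f : String × Int → Bool := fun kp => PySem.Str.isIn kp.1 text with hf
    by_cases h0 : PySem.Chars.isIn ['e', 'd', 'm'] text.toList = true
    · rw [show pvKeywords = ([] : List (String × Int)) ++ ("edm", (0 : Int)) :: [("dj", 0), ("techno", 0), ("house", 0), ("lounge", 1), ("chill", 1), ("cocktail", 1), ("bar", 2), ("pub", 2), ("tavern", 2), ("nightclub", 3), ("dance club", 3), ("club", 3), ("live", 4), ("band", 4), ("concert", 4), ("rooftop", 5)] from rfl,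
          pvLeafMin f _ _ _ _ (by simp) (by simp [hf, h0]) (by decide)]
      simp [h0, pvLabels, PySem.List.pyGet?, PySem.List.pyIdx?]
    · rw [Bool.not_eq_true] at h0
      by_cases h1 : PySem.Chars.isIn ['d', 'j'] text.toList = true
      · rw [show pvKeywords = [("edm", 0)] ++ ("dj", (0 : Int)) :: [("techno", 0), ("house", 0), ("lounge", 1), ("chill", 1), ("cocktail", 1), ("bar", 2), ("pub", 2), ("tavern", 2), ("nightclub", 3), ("dance club", 3), ("club", 3), ("live", 4), ("band", 4), ("concert", 4), ("rooftop", 5)] from rfl,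
            pvLeafMin f _ _ _ _ (by simp [hf, h0]) (by simp [hf, h1]) (by decide)]
        simp [h0, h1, pvLabels, PySem.List.pyGet?, PySem.List.pyIdx?]
      · rw [Bool.not_eq_true] at h1
        by_cases h2 : PySem.Chars.isIn ['t', 'e', 'c', 'h', 'n', 'o'] text.toList = true
        · rw [show pvKeywords = [("edm", 0), ("dj", 0)] ++ ("techno", (0 : Int)) :: [("house", 0), ("lounge", 1), ("chill", 1), ("cocktail", 1), ("bar", 2), ("pub", 2), ("tavern", 2), ("nightclub", 3), ("dance club", 3), ("club", 3), ("live", 4), ("band", 4), ("concert", 4), ("rooftop", 5)] from rfl,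
              pvLeafMin f _ _ _ _ (by simp [hf, h0, h1]) (by simp [hf, h2]) (by decide)]
          simp [h0, h1, h2, pvLabels, PySem.List.pyGet?, PySem.List.pyIdx?]
        · rw [Bool.not_eq_true] at h2
          by_cases h3 : PySem.Chars.isIn ['h', 'o', 'u', 's', 'e'] text.toList = true
          · rw [show pvKeywords = [("edm", 0), ("dj", 0), ("techno", 0)] ++ ("house", (0 : Int)) :: [("lounge", 1), ("chill", 1), ("cocktail", 1), ("bar", 2), ("pub", 2), ("tavern", 2), ("nightclub", 3), ("dance club", 3), ("club", 3), ("live", 4), ("band", 4), ("concert", 4), ("rooftop", 5)] from rfl,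
                pvLeafMin f _ _ _ _ (by simp [hf, h0, h1, h2]) (by simp [hf, h3]) (by decide)]
            simp [h0, h1, h2, h3, pvLabels, PySem.List.pyGet?, PySem.List.pyIdx?]
          · rw [Bool.not_eq_true] at h3
            by_cases h4 : PySem.Chars.isIn ['l', 'o', 'u', 'n', 'g', 'e'] text.toList = true
            · rw [show pvKeywords = [("edm", 0), ("dj", 0), ("techno", 0), ("house", 0)] ++ ("lounge", (1 : Int)) :: [("chill", 1), ("cocktail", 1), ("bar", 2), ("pub", 2), ("tavern", 2), ("nightclub", 3), ("dance club", 3), ("club", 3), ("live", 4), ("band", 4), ("concert", 4), ("rooftop", 5)] from rfl,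
                  pvLeafMin f _ _ _ _ (by simp [hf, h0, h1, h2, h3]) (by simp [hf, h4]) (by decide)]
              simp [h0, h1, h2, h3, h4, pvLabels, PySem.List.pyGet?, PySem.List.pyIdx?]
            · rw [Bool.not_eq_true] at h4
              by_cases h5 : PySem.Chars.isIn ['c', 'h', 'i', 'l', 'l'] text.toList = true
              · rw [show pvKeywords = [("edm", 0), ("dj", 0), ("techno", 0), ("house", 0), ("lounge", 1)] ++ ("chill", (1 : Int)) :: [("cocktail", 1), ("bar", 2), ("pub", 2), ("tavern", 2), ("nightclub", 3), ("dance club", 3), ("club", 3), ("live", 4), ("band", 4), ("concert", 4), ("rooftop", 5)] from rfl,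
                    pvLeafMin f _ _ _ _ (by simp [hf, h0, h1, h2, h3, h4]) (by simp [hf, h5]) (by decide)]
                simp [h0, h1, h2, h3, h4, h5, pvLabels, PySem.List.pyGet?, PySem.List.pyIdx?]
              · rw [Bool.not_eq_true] at h5
                by_cases h6 : PySem.Chars.isIn ['c', 'o', 'c', 'k', 't', 'a', 'i', 'l'] text.toList = true
                · rw [show pvKeywords = [("edm", 0), ("dj", 0), ("techno", 0), ("house", 0), ("lounge", 1), ("chill", 1)] ++ ("cocktail", (1 : Int)) :: [("bar", 2), ("pub", 2), ("tavern", 2), ("nightclub", 3), ("dance club", 3), ("club", 3), ("live", 4), ("band", 4), ("concert", 4), ("rooftop", 5)] from rfl,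
                      pvLeafMin f _ _ _ _ (by simp [hf, h0, h1, h2, h3, h4, h5]) (by simp [hf, h6]) (by decide)]
                  simp [h0, h1, h2, h3, h4, h5, h6, pvLabels, PySem.List.pyGet?, PySem.List.pyIdx?]
                · rw [Bool.not_eq_true] at h6
                  by_cases h7 : PySem.Chars.isIn ['b', 'a', 'r'] text.toList = true
                  · rw [show pvKeywords = [("edm", 0), ("dj", 0), ("techno", 0), ("house", 0), ("lounge", 1), ("chill", 1), ("cocktail", 1)] ++ ("bar", (2 : Int)) :: [("pub", 2), ("tavern", 2), ("nightclub", 3), ("dance club", 3), ("club", 3), ("live", 4), ("band", 4), ("concert", 4), ("rooftop", 5)] from rfl,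
                        pvLeafMin f _ _ _ _ (by simp [hf, h0, h1, h2, h3, h4, h5, h6]) (by simp [hf, h7]) (by decide)]
                    simp [h0, h1, h2, h3, h4, h5, h6, h7, pvLabels, PySem.List.pyGet?, PySem.List.pyIdx?]
                  · rw [Bool.not_eq_true] at h7
                    by_cases h8 : PySem.Chars.isIn ['p', 'u', 'b'] text.toList = true
                    · rw [show pvKeywords = [("edm", 0), ("dj", 0), ("techno", 0), ("house", 0), ("lounge", 1), ("chill", 1), ("cocktail", 1), ("bar", 2)] ++ ("pub", (2 : Int)) :: [("tavern", 2), ("nightclub", 3), ("dance club", 3), ("club", 3), ("live", 4), ("band", 4), ("concert", 4), ("rooftop", 5)] from rfl,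
                          pvLeafMin f _ _ _ _ (by simp [hf, h0, h1, h2, h3, h4, h5, h6, h7]) (by simp [hf, h8]) (by decide)]
                      simp [h0, h1, h2, h3, h4, h5, h6, h7, h8, pvLabels, PySem.List.pyGet?, PySem.List.pyIdx?]
                    · rw [Bool.not_eq_true] at h8
                      by_cases h9 : PySem.Chars.isIn ['t', 'a', 'v', 'e', 'r', 'n'] text.toList = true
                      · rw [show pvKeywords = [("edm", 0), ("dj", 0), ("techno", 0), ("house", 0), ("lounge", 1), ("chill", 1), ("cocktail", 1), ("bar", 2), ("pub", 2)] ++ ("tavern", (2 : Int)) :: [("nightclub", 3), ("dance club", 3), ("club", 3), ("live", 4), ("band", 4), ("concert", 4), ("rooftop", 5)] from rfl,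
                            pvLeafMin f _ _ _ _ (by simp [hf, h0, h1, h2, h3, h4, h5, h6, h7, h8]) (by simp [hf, h9]) (by decide)]
                        simp [h0, h1, h2, h3, h4, h5, h6, h7, h8, h9, pvLabels, PySem.List.pyGet?, PySem.List.pyIdx?]
                      · rw [Bool.not_eq_true] at h9
                        by_cases h10 : PySem.Chars.isIn ['n', 'i', 'g', 'h', 't', 'c', 'l', 'u', 'b'] text.toList = true
                        · rw [show pvKeywords = [("edm", 0), ("dj", 0), ("techno", 0), ("house", 0), ("lounge", 1), ("chill", 1), ("cocktail", 1), ("bar", 2), ("pub", 2), ("tavern", 2)] ++ ("nightclub", (3 : Int)) :: [("dance club", 3), ("club", 3), ("live", 4), ("band", 4), ("concert", 4), ("rooftop", 5)] from rfl,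
                              pvLeafMin f _ _ _ _ (by simp [hf, h0, h1, h2, h3, h4, h5, h6, h7, h8, h9]) (by simp [hf, h10]) (by decide)]
                          simp [h0, h1, h2, h3, h4, h5, h6, h7, h8, h9, h10, pvLabels, PySem.List.pyGet?, PySem.List.pyIdx?]
                        · rw [Bool.not_eq_true] at h10
                          by_cases h11 : PySem.Chars.isIn ['d', 'a', 'n', 'c', 'e', ' ', 'c', 'l', 'u', 'b'] text.toList = true
                          · rw [show pvKeywords = [("edm", 0), ("dj", 0), ("techno", 0), ("house", 0), ("lounge", 1), ("chill", 1), ("cocktail", 1), ("bar", 2), ("pub", 2), ("tavern", 2), ("nightclub", 3)] ++ ("dance club", (3 : Int)) :: [("club", 3), ("live", 4), ("band", 4), ("concert", 4), ("rooftop", 5)] from rfl,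
                                pvLeafMin f _ _ _ _ (by simp [hf, h0, h1, h2, h3, h4, h5, h6, h7, h8, h9, h10]) (by simp [hf, h11]) (by decide)]
                            simp [h0, h1, h2, h3, h4, h5, h6, h7, h8, h9, h10, h11, pvLabels, PySem.List.pyGet?, PySem.List.pyIdx?]
                          · rw [Bool.not_eq_true] at h11
                            by_cases h12 : PySem.Chars.isIn ['c', 'l', 'u', 'b'] text.toList = true
                            · rw [show pvKeywords = [("edm", 0), ("dj", 0), ("techno", 0), ("house", 0), ("lounge", 1), ("chill", 1), ("cocktail", 1), ("bar", 2), ("pub", 2), ("tavern", 2), ("nightclub", 3), ("dance club", 3)] ++ ("club", (3 : Int)) :: [("live", 4), ("band", 4), ("concert", 4), ("rooftop", 5)] from rfl,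
                                  pvLeafMin f _ _ _ _ (by simp [hf, h0, h1, h2, h3, h4, h5, h6, h7, h8, h9, h10, h11]) (by simp [hf, h12]) (by decide)]
                              simp [h0, h1, h2, h3, h4, h5, h6, h7, h8, h9, h10, h11, h12, pvLabels, PySem.List.pyGet?, PySem.List.pyIdx?]
                            · rw [Bool.not_eq_true] at h12
                              by_cases h13 : PySem.Chars.isIn ['l', 'i', 'v', 'e'] text.toList = true
                              · rw [show pvKeywords = [("edm", 0), ("dj", 0), ("techno", 0), ("house", 0), ("lounge", 1), ("chill", 1), ("cocktail", 1), ("bar", 2), ("pub", 2), ("tavern", 2), ("nightclub", 3), ("dance club", 3), ("club", 3)] ++ ("live", (4 : Int)) :: [("band", 4), ("concert", 4), ("rooftop", 5)] from rfl,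
                                    pvLeafMin f _ _ _ _ (by simp [hf, h0, h1, h2, h3, h4, h5, h6, h7, h8, h9, h10, h11, h12]) (by simp [hf, h13]) (by decide)]
                                simp [h0, h1, h2, h3, h4, h5, h6, h7, h8, h9, h10, h11, h12, h13, pvLabels, PySem.List.pyGet?, PySem.List.pyIdx?]
                              · rw [Bool.not_eq_true] at h13
                                by_cases h14 : PySem.Chars.isIn ['b', 'a', 'n', 'd'] text.toList = true
                                · rw [show pvKeywords = [("edm", 0), ("dj", 0), ("techno", 0), ("house", 0), ("lounge", 1), ("chill", 1), ("cocktail", 1), ("bar", 2), ("pub", 2), ("tavern", 2), ("nightclub", 3), ("dance club", 3), ("club", 3), ("live", 4)] ++ ("band", (4 : Int)) :: [("concert", 4), ("rooftop", 5)] from rfl,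
                                      pvLeafMin f _ _ _ _ (by simp [hf, h0, h1, h2, h3, h4, h5, h6, h7, h8, h9, h10, h11, h12, h13]) (by simp [hf, h14]) (by decide)]
                                  simp [h0, h1, h2, h3, h4, h5, h6, h7, h8, h9, h10, h11, h12, h13, h14, pvLabels, PySem.List.pyGet?, PySem.List.pyIdx?]
                                · rw [Bool.not_eq_true] at h14
                                  by_cases h15 : PySem.Chars.isIn ['c', 'o', 'n', 'c', 'e', 'r', 't'] text.toList = true
                                  · rw [show pvKeywords = [("edm", 0), ("dj", 0), ("techno", 0), ("house", 0), ("lounge", 1), ("chill", 1), ("cocktail", 1), ("bar", 2), ("pub", 2), ("tavern", 2), ("nightclub", 3), ("dance club", 3), ("club", 3), ("live", 4), ("band", 4)] ++ ("concert", (4 : Int)) :: [("rooftop", 5)] from rfl,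
                                        pvLeafMin f _ _ _ _ (by simp [hf, h0, h1, h2, h3, h4, h5, h6, h7, h8, h9, h10, h11, h12, h13, h14]) (by simp [hf, h15]) (by decide)]
                                    simp [h0, h1, h2, h3, h4, h5, h6, h7, h8, h9, h10, h11, h12, h13, h14, h15, pvLabels, PySem.List.pyGet?, PySem.List.pyIdx?]
                                  · rw [Bool.not_eq_true] at h15
                                    by_cases h16 : PySem.Chars.isIn ['r', 'o', 'o', 'f', 't', 'o', 'p'] text.toList = true
                                    · rw [show pvKeywords = [("edm", 0), ("dj", 0), ("techno", 0), ("house", 0), ("lounge", 1), ("chill", 1), ("cocktail", 1), ("bar", 2), ("pub", 2), ("tavern", 2), ("nightclub", 3), ("dance club", 3), ("club", 3), ("live", 4), ("band", 4), ("concert", 4)] ++ ("rooftop", (5 : Int)) :: ([] : List (String × Int)) from rfl,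
                                          pvLeafMin f _ _ _ _ (by simp [hf, h0, h1, h2, h3, h4, h5, h6, h7, h8, h9, h10, h11, h12, h13, h14, h15]) (by simp [hf, h16]) (by decide)]
                                      simp [h0, h1, h2, h3, h4, h5, h6, h7, h8, h9, h10, h11, h12, h13, h14, h15, h16, pvLabels, PySem.List.pyGet?, PySem.List.pyIdx?]
                                    · rw [Bool.not_eq_true] at h16
                                      have hnil : pvKeywords.filter f = [] := by simp [hf, pvKeywords, h0, h1, h2, h3, h4, h5, h6, h7, h8, h9, h10, h11, h12, h13, h14, h15, h16]
                                      rw [hnil]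
                                      simp [h0, h1, h2, h3, h4, h5, h6, h7, h8, h9, h10, h11, h12, h13, h14, h15, h16, PySem.List.min?]
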